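-- pv_equiv track=rewrite | github.com/Muhkammadjon/hemisbot | mk.py | tayyor
-- ===== SOURCE A (Python) =====
-- def tayyor(file):
--     text=[]
--     i=1
--
--     for bolak in file:
--         if bolak=='':
--             continue
--         if i==1:
--             text.append(bolak)
--         elif i==2:
--             text.append(bolak)
--         elif 2<i<=5:
--             if i==5:
--                 text.extend([bolak,"1"])
--             else:
--                 text.append(bolak)
--         i+=1
--         if i>5:
--             i=1
--
--     return text
-- ===== SOURCE B (Python) =====
-- def tayyor(file):
--     items = [x for x in file if x != '']
--     text = []
--     start = 0
--     while start < len(items):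
--         chunk = items[start:start + 5]
--         text.extend(chunk)
--         if len(chunk) == 5:
--             text.append("1")
--         start += 5
--     return text
-- ===== Notes on version B (the rewrite author's own statement) =====
-- stated objective: alternative
-- what changed: B first filters out the empty strings, then walks the filtered list in 5-item slices (extend chunk, append '1' only for complete chunks) instead of A's per-item cyclic counter with a 4-way branch chain.
import Mathlib
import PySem

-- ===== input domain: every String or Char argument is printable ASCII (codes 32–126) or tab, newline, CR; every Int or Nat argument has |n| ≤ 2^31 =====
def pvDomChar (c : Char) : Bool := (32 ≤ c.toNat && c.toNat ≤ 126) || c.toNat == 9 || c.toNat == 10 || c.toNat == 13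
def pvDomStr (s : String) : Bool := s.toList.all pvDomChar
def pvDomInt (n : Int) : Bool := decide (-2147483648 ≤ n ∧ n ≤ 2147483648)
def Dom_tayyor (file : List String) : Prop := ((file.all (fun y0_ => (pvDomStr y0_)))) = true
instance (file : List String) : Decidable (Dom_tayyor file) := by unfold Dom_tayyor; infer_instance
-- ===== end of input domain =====

-- B filters out empty strings first and then walks the filtered list in 5-item slices
-- (appending "1" after each complete slice) instead of A's per-item cyclic counter.

-- ===== PORT A =====
-- literal port of A's loop: state (text, i), skip "", branch chain, counter wrap
def tayyorLoop : List String → Int → List String → List String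
  | [], _, text => text
  | bolak :: rest, i, text =>
    if bolak = "" then tayyorLoop rest i text
    else
      let text' :=
        if i = 1 then text ++ [bolak]
        else if i = 2 then text ++ [bolak]
        else if 2 < i ∧ i ≤ 5 then
          (if i = 5 then text ++ [bolak, "1"] else text ++ [bolak])
        else text
      let i' := i + 1
      let i'' := if i' > 5 then (1 : Int) else i'
      tayyorLoop rest i'' text'

def tayyor (file : List String) : List String := tayyorLoop file 1 []

-- ===== PORT B =====
-- B's while loop: start runs 0,5,10,…; chunk = items[start:start+5]
def tayyorAltGo (items : List String) (start : Nat) (text : List String) : List String :=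
  if start < items.length then
    let chunk := PySem.List.slice items (some (start : Int)) (some ((start : Int) + 5))
    let text' := text ++ chunk ++ (if chunk.length = 5 then ["1"] else [])
    tayyorAltGo items (start + 5) text'
  else text
termination_by items.length - start

def tayyor_alt (file : List String) : List String :=
  let items := file.filter (fun x => x ≠ "")
  tayyorAltGo items 0 []

-- ===== PRECONDITION & SPEC =====
def Spec_tayyor (file : List String) (out : List String) : Prop := out = tayyor_alt file
instance (file : List String) (out : List String) : Decidable (Spec_tayyor file out) := by unfold Spec_tayyor; infer_instance

-- ===== CLAIM (what is proved, stated in full; the proofs are below) =====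
def Claim_equal_tayyor : Prop := ∀ (file : List String), Dom_tayyor file → Spec_tayyor file (tayyor file)

-- ===== LEMMAS AND PROOFS =====

-- proof-only intermediary: the chunked output, recursively
def tayyorChunks (items : List String) : List String :=
  if items = [] then []
  else
    let chunk := items.take 5
    let rest := items.drop 5
    chunk ++ (if chunk.length = 5 then ["1"] else []) ++ tayyorChunks rest
termination_by items.length
decreasing_by
  rename_i h
  have : items.length ≠ 0 := by simpa [List.length_eq_zero_iff] using h
  simp [List.length_drop]; omega

-- A's loop ignores empty strings: it equals the loop on the filtered list.
theorem tayyorLoop_filter (l : List String) (i : Int) (acc : List String) :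
    tayyorLoop l i acc = tayyorLoop (l.filter (fun x => x ≠ "")) i acc := by
  induction l generalizing i acc with
  | nil => rfl
  | cons x xs ih =>
    by_cases hx : x = ""
    · simp [tayyorLoop, hx, ih]
    · simp only [tayyorLoop, List.filter_cons, hx]
      simp [hx, tayyorLoop, ih]

-- On a list with no empty strings, A's counter loop from i = 1 produces the chunked output.
theorem tayyorLoop_eq_chunks :
    ∀ (n : Nat) (l : List String), l.length ≤ n → (∀ x ∈ l, x ≠ "") →
      ∀ acc, tayyorLoop l 1 acc = acc ++ tayyorChunks l := by
  intro n
  induction n with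
  | zero =>
    intro l hl _ acc
    have : l = [] := by cases l <;> simp_all
    subst this; simp [tayyorLoop, tayyorChunks]
  | succ n ih =>
    intro l hl hne acc
    match l with
    | [] => simp [tayyorLoop, tayyorChunks]
    | [a] =>
      have ha : a ≠ "" := hne a (by simp)
      simp [tayyorLoop, tayyorChunks, ha]
    | [a, b] =>
      have ha : a ≠ "" := hne a (by simp)
      have hb : b ≠ "" := hne b (by simp)
      simp [tayyorLoop, tayyorChunks, ha, hb]
    | [a, b, c] =>
      have ha : a ≠ "" := hne a (by simp)
      have hb : b ≠ "" := hne b (by simp)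
      have hc : c ≠ "" := hne c (by simp)
      simp [tayyorLoop, tayyorChunks, ha, hb, hc]
    | [a, b, c, d] =>
      have ha : a ≠ "" := hne a (by simp)
      have hb : b ≠ "" := hne b (by simp)
      have hc : c ≠ "" := hne c (by simp)
      have hd : d ≠ "" := hne d (by simp)
      simp [tayyorLoop, tayyorChunks, ha, hb, hc, hd]
    | a :: b :: c :: d :: e :: rest =>
      have ha : a ≠ "" := hne a (by simp)
      have hb : b ≠ "" := hne b (by simp)
      have hc : c ≠ "" := hne c (by simp)
      have hd : d ≠ "" := hne d (by simp)
      have he : e ≠ "" := hne e (by simp)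
      have hrest : ∀ x ∈ rest, x ≠ "" := fun x hx => hne x (by simp [hx])
      have hlen : rest.length ≤ n := by simp at hl; omega
      have step : tayyorLoop (a :: b :: c :: d :: e :: rest) 1 acc
          = tayyorLoop rest 1 (acc ++ [a, b, c, d, e, "1"]) := by
        simp only [tayyorLoop, if_neg ha, if_neg hb, if_neg hc, if_neg hd, if_neg he]
        norm_num
      rw [step, ih rest hlen hrest]
      conv_rhs => rw [tayyorChunks]
      simp

-- B's index loop produces the chunked output of the not-yet-visited suffix.
theorem tayyorAltGo_eq_chunks :
    ∀ (n : Nat) (items : List String) (start : Nat), items.length - start ≤ n →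
      ∀ text, tayyorAltGo items start text = text ++ tayyorChunks (items.drop start) := by
  intro n
  induction n with
  | zero =>
    intro items start h text
    have hge : items.length ≤ start := by omega
    rw [tayyorAltGo]
    simp [Nat.not_lt.mpr hge, List.drop_eq_nil_of_le hge, tayyorChunks]
  | succ n ih =>
    intro items start h text
    by_cases hlt : start < items.length
    · rw [tayyorAltGo, if_pos hlt]
      have hslice : PySem.List.slice items (some (start : Int)) (some ((start : Int) + 5))
          = (items.drop start).take 5 := by
        have : ((start : Int) + 5) = ((start : Int) + ((5 : Nat) : Int)) := by norm_num
        rw [this, PySem.List.slice_natCast_add]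
      rw [hslice]
      rw [ih items (start + 5) (by omega) _]
      conv_rhs => rw [tayyorChunks]
      have hnil : items.drop start ≠ [] := by
        simp [List.drop_eq_nil_iff]; omega
      rw [if_neg hnil]
      simp [List.drop_drop]
    · rw [tayyorAltGo, if_neg hlt]
      have hge : items.length ≤ start := by omega
      rw [List.drop_eq_nil_of_le hge]
      simp [tayyorChunks]

theorem tayyor_spec : Claim_equal_tayyor := by
  intro file _
  unfold Spec_tayyor tayyor tayyor_alt
  rw [tayyorLoop_filter]
  have hne : ∀ x ∈ file.filter (fun x => x ≠ ""), x ≠ "" := by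
    intro x hx
    simpa using (List.mem_filter.mp hx).2
  show tayyorLoop (file.filter (fun x => x ≠ "")) 1 []
      = tayyorAltGo (file.filter (fun x => x ≠ "")) 0 []
  rw [tayyorLoop_eq_chunks (file.filter (fun x => x ≠ "")).length
        (file.filter (fun x => x ≠ "")) le_rfl hne []]
  rw [tayyorAltGo_eq_chunks (file.filter (fun x => x ≠ "")).length
        (file.filter (fun x => x ≠ "")) 0 (by omega) []]
  simp
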